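-- pv_equiv track=rewrite | github.com/jeremiah-c-leary/vhdl-style-guide | vsg/vhdlFile/extract/get_subprogram_body.py | extract_inner_pair
-- ===== SOURCE A (Python) =====
-- def extract_inner_pair(lStartIndexes, lEndIndexes):
--     dPairs = {}
--     for iStart in lStartIndexes:
--         dPairs[iStart] = {}
--         for iEnd in lEndIndexes:
--             if iEnd - iStart > 0:
--                 dPairs[iStart][iEnd] = iEnd - iStart
--
--     iMinDelta = lEndIndexes[-1]
--     for iStart in dPairs:
--         for iEnd in dPairs[iStart]:
--             if dPairs[iStart][iEnd] < iMinDelta: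
--                 lPair = [iStart, iEnd]
--                 iMinDelta = dPairs[iStart][iEnd]
--
--     lStartIndexes.remove(lPair[0])
--     lEndIndexes.remove(lPair[1])
--     return lPair, lStartIndexes, lEndIndexes
-- ===== SOURCE B (Python) =====
-- def extract_inner_pair(lStartIndexes, lEndIndexes):
--     iThreshold = lEndIndexes[-1]
--     lSortedEnds = sorted(lEndIndexes)
--     lPair = None
--     iMinDelta = iThreshold
--     for iStart in lStartIndexes:
--         for iEnd in lSortedEnds:
--             if iEnd > iStart:
--                 if iEnd - iStart < iMinDelta:
--                     lPair = [iStart, iEnd]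
--                     iMinDelta = iEnd - iStart
--                 break
--     lStartIndexes.remove(lPair[0])
--     lEndIndexes.remove(lPair[1])
--     return lPair, lStartIndexes, lEndIndexes
-- ===== Notes on version B (the rewrite author's own statement) =====
-- stated objective: faster
-- what changed: B drops A's dict-of-dicts materialization of all positive deltas entirely: it sorts the end indexes once and, for each start in list order, takes only the first sorted end greater than the start (that start's minimum delta) with an early break, keeping the first strict global minimum; intended as faster, measured 19.95x at n=1024 and 37.6x at n=4096 (where A times out) in a timing run.
import Mathlib
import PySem

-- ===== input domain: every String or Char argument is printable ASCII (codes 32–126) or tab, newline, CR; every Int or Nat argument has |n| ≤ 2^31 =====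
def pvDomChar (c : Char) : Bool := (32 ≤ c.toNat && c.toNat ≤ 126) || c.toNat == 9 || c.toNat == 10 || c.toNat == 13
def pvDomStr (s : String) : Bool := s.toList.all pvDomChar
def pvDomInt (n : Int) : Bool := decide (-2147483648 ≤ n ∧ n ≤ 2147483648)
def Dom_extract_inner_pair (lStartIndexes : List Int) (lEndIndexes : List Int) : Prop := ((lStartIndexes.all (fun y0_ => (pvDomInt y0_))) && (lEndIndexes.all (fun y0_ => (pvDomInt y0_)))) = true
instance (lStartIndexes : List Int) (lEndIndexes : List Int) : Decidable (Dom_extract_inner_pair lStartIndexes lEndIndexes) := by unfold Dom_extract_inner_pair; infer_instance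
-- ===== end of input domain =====

-- B replaces A's dict-of-dicts of all positive deltas by one sort of the end indexes plus, per start,
-- the first greater sorted end (early break), keeping the first strict global minimum: same value.
-- Both Pythons mutate the argument lists with .remove; the ports model the RETURNED lists.

-- ===== PORT A =====
def extract_inner_pair (lStartIndexes : List Int) (lEndIndexes : List Int) : List Int × List Int × List Int :=
  -- dPairs[iStart][iEnd] = iEnd - iStart for every positive delta
  let dPairs : PySem.Dict Int (PySem.Dict Int Int) :=
    lStartIndexes.foldl (fun d iStart =>
      d.insert iStart
        (lEndIndexes.foldl (fun inn iEnd =>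
          if iEnd - iStart > 0 then inn.insert iEnd (iEnd - iStart) else inn)
          PySem.Dict.empty))
      PySem.Dict.empty
  let iMinDelta : Int := PySem.List.pyGetD lEndIndexes (-1) 0   -- lEndIndexes[-1]; Pre_ gives lEndIndexes ≠ []
  -- scan the nested dict for the first strict minimum; lPair is unassigned (none) until the first hit
  let st : Option (Int × Int) × Int :=
    dPairs.items.foldl (fun st si =>
      si.2.items.foldl (fun st ei =>
        if ei.2 < st.2 then (some (si.1, ei.1), ei.2) else st) st)
      (none, iMinDelta)
  match st.1 with
  | some p => ([p.1, p.2],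
               (PySem.List.remove? lStartIndexes p.1).getD lStartIndexes,
               (PySem.List.remove? lEndIndexes p.2).getD lEndIndexes)
  | none => ([], lStartIndexes, lEndIndexes)   -- Python raises NameError here; excluded by Pre_

-- ===== PORT B =====
def extract_inner_pair_alt (lStartIndexes : List Int) (lEndIndexes : List Int) : List Int × List Int × List Int :=
  let iThreshold : Int := PySem.List.pyGetD lEndIndexes (-1) 0   -- lEndIndexes[-1]; Pre_ gives lEndIndexes ≠ []
  let lSortedEnds : List Int := PySem.List.sorted lEndIndexes (fun x => x) false
  let st : Option (Int × Int) × Int :=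
    lStartIndexes.foldl (fun st iStart =>
      -- inner for-loop with break: first sorted end greater than iStart
      match lSortedEnds.find? (fun iEnd => decide (iStart < iEnd)) with
      | some iEnd => if iEnd - iStart < st.2 then (some (iStart, iEnd), iEnd - iStart) else st
      | none => st)
      (none, iThreshold)
  match st.1 with
  | some p => ([p.1, p.2],
               (PySem.List.remove? lStartIndexes p.1).getD lStartIndexes,
               (PySem.List.remove? lEndIndexes p.2).getD lEndIndexes)
  | none => ([], lStartIndexes, lEndIndexes)   -- Python raises TypeError here; excluded by Pre_

-- ===== PRECONDITION & SPEC =====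
-- Pre_ = exactly the inputs where Python A returns normally: lEndIndexes nonempty (else IndexError
-- on lEndIndexes[-1]) and some pair with positive delta strictly below lEndIndexes[-1] exists
-- (else lPair is never assigned and A raises NameError).
def Pre_extract_inner_pair (lStartIndexes : List Int) (lEndIndexes : List Int) : Prop :=
  lEndIndexes ≠ [] ∧
  ∃ s ∈ lStartIndexes, ∃ e ∈ lEndIndexes, s < e ∧ e - s < lEndIndexes.getLast?.getD 0
instance (lStartIndexes : List Int) (lEndIndexes : List Int) : Decidable (Pre_extract_inner_pair lStartIndexes lEndIndexes) := by unfold Pre_extract_inner_pair; infer_instance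

def pvWitness_extract_inner_pair : List Int × List Int := ([0], [5, 10])

def Spec_extract_inner_pair (lStartIndexes : List Int) (lEndIndexes : List Int) (out : List Int × List Int × List Int) : Prop := out = extract_inner_pair_alt lStartIndexes lEndIndexes
instance (lStartIndexes : List Int) (lEndIndexes : List Int) (out : List Int × List Int × List Int) : Decidable (Spec_extract_inner_pair lStartIndexes lEndIndexes out) := by unfold Spec_extract_inner_pair; infer_instance

-- ===== CLAIM (what is proved, stated in full; the proofs are below) =====
def Claim_equal_extract_inner_pair : Prop := ∀ (lStartIndexes : List Int) (lEndIndexes : List Int), Dom_extract_inner_pair lStartIndexes lEndIndexes → Pre_extract_inner_pair lStartIndexes lEndIndexes → Spec_extract_inner_pair lStartIndexes lEndIndexes (extract_inner_pair lStartIndexes lEndIndexes)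

-- ===== LEMMAS AND PROOFS =====

-- the scan state shared by both reductions: (lPair as an optional pair, iMinDelta)
abbrev PvSt := Option (Int × Int) × Int

-- A's inner minimum scan for one start s over a list of candidate ends
def pvInner (s : Int) (st : PvSt) (l : List Int) : PvSt :=
  l.foldl (fun st e => if e - s < st.2 then (some (s, e), e - s) else st) st

-- B's per-start step
def pvStep (sortedEnds : List Int) (st : PvSt) (s : Int) : PvSt :=
  match sortedEnds.find? (fun e => decide (s < e)) with
  | some e => if e - s < st.2 then (some (s, e), e - s) else st
  | none => st

-- the minimum value of a list (none for [])
def pvMin : List Int → Option Int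
  | [] => none
  | e :: l => some (match pvMin l with | none => e | some m => min e m)

lemma pvMin_eq_none (l : List Int) : pvMin l = none ↔ l = [] := by
  cases l <;> simp [pvMin]

lemma pvMin_mem : ∀ (l : List Int) (m : Int), pvMin l = some m → m ∈ l
  | e :: l, m, h => by
    simp only [pvMin] at h
    cases hl : pvMin l with
    | none => rw [hl] at h; simp at h; simp [h]
    | some m' =>
      rw [hl] at h
      simp only [Option.some.injEq] at h
      rcases le_total e m' with h1 | h1
      · rw [min_eq_left h1] at h; simp [h]
      · rw [min_eq_right h1] at h
        exact List.mem_cons_of_mem _ (h ▸ pvMin_mem l m' hl)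

lemma pvMin_le : ∀ (l : List Int) (m : Int), pvMin l = some m → ∀ x ∈ l, m ≤ x
  | e :: l, m, h, x, hx => by
    simp only [pvMin] at h
    cases hl : pvMin l with
    | none =>
      rw [hl] at h; simp at h
      have : l = [] := (pvMin_eq_none l).mp hl
      subst this
      rcases List.mem_cons.mp hx with rfl | hx'
      · omega
      · simp at hx'
    | some m' =>
      rw [hl] at h
      simp only [Option.some.injEq] at h
      rcases List.mem_cons.mp hx with rfl | hx'
      · omega
      · have := pvMin_le l m' hl x hx'
        omega

lemma pvMin_eq_some : ∀ (l : List Int) (m : Int), m ∈ l → (∀ x ∈ l, m ≤ x) → pvMin l = some m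
  | e :: l, m, hm, hlb => by
    simp only [pvMin]
    cases hl : pvMin l with
    | none =>
      have : l = [] := (pvMin_eq_none l).mp hl
      subst this
      simp at hm; simp [hm]
    | some m' =>
      have h1 : m ≤ e := hlb e List.mem_cons_self
      have h2 : m ≤ m' := hlb m' (List.mem_cons_of_mem _ (pvMin_mem l m' hl))
      rcases List.mem_cons.mp hm with rfl | hm'
      · simp; omega
      · have h3 : m' ≤ m := pvMin_le l m' hl m hm'
        simp; omega

-- A's inner scan computes: update with the minimum candidate delta iff it beats the current one
lemma pvInner_eq (s : Int) : ∀ (l : List Int) (st : PvSt),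
    pvInner s st l = match pvMin l with
      | none => st
      | some m => if m - s < st.2 then (some (s, m), m - s) else st
  | [], st => rfl
  | e :: l, st => by
    have hstep : pvInner s st (e :: l) =
        pvInner s (if e - s < st.2 then (some (s, e), e - s) else st) l := rfl
    rw [hstep, pvInner_eq s l]
    simp only [pvMin]
    cases hl : pvMin l with
    | none =>
      dsimp only
    | some m =>
      dsimp only
      rcases le_total e m with h | h
      · simp only [min_eq_left h]
        by_cases h1 : e - s < st.2
        · rw [if_pos h1]
          dsimp only
          rw [if_neg (show ¬ (m - s < e - s) by omega)]
        · rw [if_neg h1]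
          rw [if_neg (show ¬ (m - s < st.2) by omega)]
      · simp only [min_eq_right h]
        by_cases h1 : e - s < st.2
        · rw [if_pos h1]
          dsimp only
          by_cases h2 : m - s < e - s
          · rw [if_pos h2, if_pos (show m - s < st.2 by omega)]
          · have : m = e := by omega
            subst this
            rw [if_neg h2, if_pos h1]
        · rw [if_neg h1]

-- on a ≤-sorted list, find? (s < ·) returns the least element above s
lemma pvFind_first_gt (s : Int) : ∀ (l : List Int), l.Pairwise (fun a b => a ≤ b) →
    ∀ m, l.find? (fun e => decide (s < e)) = some m →
    m ∈ l ∧ s < m ∧ ∀ x ∈ l, s < x → m ≤ x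
  | e :: l, hp, m, h => by
    rcases List.pairwise_cons.mp hp with ⟨hle, hp'⟩
    by_cases hse : s < e
    · rw [List.find?_cons_of_pos (by simpa using hse)] at h
      simp only [Option.some.injEq] at h
      subst h
      refine ⟨List.mem_cons_self, hse, ?_⟩
      intro x hx _
      rcases List.mem_cons.mp hx with rfl | hx'
      · exact le_refl _
      · exact hle x hx'
    · rw [List.find?_cons_of_neg (by simpa using hse)] at h
      obtain ⟨hm, hsm, hlb⟩ := pvFind_first_gt s l hp' m h
      refine ⟨List.mem_cons_of_mem _ hm, hsm, ?_⟩
      intro x hx hsx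
      rcases List.mem_cons.mp hx with rfl | hx'
      · exact absurd hsx hse
      · exact hlb x hx' hsx

-- bridge: A's inner scan over the deduplicated positive-delta ends = B's sorted-first-greater step
lemma pvBridge (le : List Int) (s : Int) (st : PvSt) :
    pvInner s st (PySem.List.dedup (le.filter (fun e => decide (e - s > 0)))) =
    pvStep (PySem.List.sorted le (fun x => x) false) st s := by
  unfold pvStep
  cases hf : (PySem.List.sorted le (fun x => x) false).find? (fun e => decide (s < e)) with
  | none =>
    have hnone : ∀ x ∈ le, ¬ s < x := by
      intro x hx
      have := List.find?_eq_none.mp hf x ((PySem.List.mem_sorted le (fun x => x) false x).mpr hx)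
      simpa using this
    have hfil : le.filter (fun e => decide (e - s > 0)) = [] := by
      apply List.filter_eq_nil_iff.mpr
      intro a ha
      have := hnone a ha
      simp only [decide_eq_true_eq]
      omega
    rw [hfil]
    rfl
  | some m =>
    have hp : (PySem.List.sorted le (fun x => x) false).Pairwise (fun a b => a ≤ b) :=
      PySem.List.sorted_pairwise le (fun x => x)
    obtain ⟨hmL, hsm, hlb⟩ := pvFind_first_gt s _ hp m hf
    have hmle : m ∈ le := (PySem.List.mem_sorted le (fun x => x) false m).mp hmL
    have hmem : m ∈ PySem.List.dedup (le.filter (fun e => decide (e - s > 0))) := by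
      rw [PySem.List.mem_dedup]
      exact List.mem_filter.mpr ⟨hmle, by simp only [decide_eq_true_eq]; omega⟩
    have hlb' : ∀ x ∈ PySem.List.dedup (le.filter (fun e => decide (e - s > 0))), m ≤ x := by
      intro x hx
      rw [PySem.List.mem_dedup] at hx
      obtain ⟨hx1, hx2⟩ := List.mem_filter.mp hx
      simp only [decide_eq_true_eq] at hx2
      exact hlb x ((PySem.List.mem_sorted le (fun x => x) false x).mpr hx1) (by omega)
    rw [pvInner_eq, pvMin_eq_some _ m hmem hlb']

-- the result delta never grows
lemma pvStep_snd_le (L : List Int) (st : PvSt) (s : Int) : (pvStep L st s).2 ≤ st.2 := by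
  unfold pvStep
  split
  · split_ifs with h
    · dsimp only; omega
    · exact le_refl _
  · exact le_refl _

-- after a start has been processed, re-processing it from any not-larger delta is a no-op
lemma pvStep_absorb (L : List Int) (st st' : PvSt) (s : Int)
    (h : st'.2 ≤ (pvStep L st s).2) : pvStep L st' s = st' := by
  unfold pvStep at *
  cases hf : L.find? (fun e => decide (s < e)) with
  | none => rfl
  | some e =>
    rw [hf] at h
    dsimp only at h ⊢
    by_cases hc : e - s < st.2
    · rw [if_pos hc] at h
      dsimp only at h
      rw [if_neg (show ¬ (e - s < st'.2) by omega)]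
    · rw [if_neg hc] at h
      rw [if_neg (show ¬ (e - s < st'.2) by omega)]

-- skipping later duplicates of an already-absorbed start does not change the fold
lemma pvSkip (L : List Int) (s : Int) : ∀ (l : List Int) (st : PvSt),
    (∀ st' : PvSt, st'.2 ≤ st.2 → pvStep L st' s = st') →
    (l.filter (fun x => !(x == s))).foldl (pvStep L) st = l.foldl (pvStep L) st
  | [], st, _ => rfl
  | x :: l, st, h => by
    by_cases hx : x = s
    · subst hx
      rw [List.filter_cons_of_neg (by simp), List.foldl_cons, h st (le_refl _)]
      exact pvSkip L x l st h
    · rw [List.filter_cons_of_pos (by simp [hx]), List.foldl_cons, List.foldl_cons]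
      exact pvSkip L s l (pvStep L st x)
        (fun st' h' => h st' (le_trans h' (pvStep_snd_le L st x)))

-- folding the scan step over the deduplicated starts = folding it over all starts
lemma pvDedupFold (L : List Int) : ∀ (l : List Int) (st : PvSt),
    (PySem.List.dedup l).foldl (pvStep L) st = l.foldl (pvStep L) st
  | [], _ => rfl
  | x :: l, st => by
    have hcons : PySem.List.dedup (x :: l)
        = x :: (PySem.List.dedup l).filter (fun y => !(y == x)) := by
      simp only [PySem.List.dedup_eq_ofList, PySem.Set.ofList_cons]
      rfl
    rw [hcons, List.foldl_cons,
        pvSkip L x (PySem.List.dedup l) (pvStep L st x)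
          (fun st' h' => pvStep_absorb L st st' x h'),
        pvDedupFold L l (pvStep L st x), List.foldl_cons]

-- a fold inserting (k, f k) yields exactly the first-occurrence keys with value f k
lemma pvDictGet {X : Type} (f : Int → X) : ∀ (l : List Int) (d : PySem.Dict Int X) (k : Int),
    (l.foldl (fun d s => d.insert s (f s)) d).get? k = if k ∈ l then some (f k) else d.get? k
  | [], d, k => by simp
  | s :: l, d, k => by
    rw [List.foldl_cons, pvDictGet f l _ k, PySem.Dict.get?_insert]
    by_cases h1 : k ∈ l <;> by_cases h2 : k = s <;> simp [h1, h2, List.mem_cons]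

lemma pvDictItems {X : Type} (f : Int → X) (dflt : X) (l : List Int) :
    (l.foldl (fun d s => d.insert s (f s)) (PySem.Dict.empty : PySem.Dict Int X)).items
      = (PySem.List.dedup l).map (fun k => (k, f k)) := by
  have hkeys : (l.foldl (fun d s => d.insert s (f s)) (PySem.Dict.empty : PySem.Dict Int X)).keys
      = PySem.Set.update (PySem.Dict.empty : PySem.Dict Int X).keys l :=
    PySem.Dict.keys_foldl_insert l (fun _ s => f s) _
  rw [PySem.Dict.keys_empty, PySem.Set.update_nil_left, ← PySem.List.dedup_eq_ofList] at hkeys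
  have hnd : (l.foldl (fun d s => d.insert s (f s)) (PySem.Dict.empty : PySem.Dict Int X)).keys.Nodup :=
    PySem.Dict.nodup_keys_foldl_insert l (fun _ s => f s) _ PySem.Dict.nodup_keys_empty
  rw [PySem.Dict.items_eq_map_keys _ hnd dflt, hkeys]
  apply List.map_congr_left
  intro k hk
  have hkl : k ∈ l := (PySem.List.mem_dedup l k).mp hk
  rw [PySem.Dict.getD_eq_get?_getD, pvDictGet f l _ k, if_pos hkl]
  rfl

-- the full scan of A's nested dict = B's single fold over the starts
lemma pvScan_eq (ls le : List Int) (init : PvSt) :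
    ((ls.foldl (fun (d : PySem.Dict Int (PySem.Dict Int Int)) iStart =>
        d.insert iStart (le.foldl (fun (inn : PySem.Dict Int Int) iEnd =>
          if iEnd - iStart > 0 then inn.insert iEnd (iEnd - iStart) else inn) PySem.Dict.empty))
        PySem.Dict.empty).items.foldl
      (fun (st : PvSt) si => si.2.items.foldl
        (fun st ei => if ei.2 < st.2 then (some (si.1, ei.1), ei.2) else st) st) init)
    = ls.foldl (pvStep (PySem.List.sorted le (fun x => x) false)) init := by
  have hinner : ∀ s : Int,
      (le.foldl (fun (inn : PySem.Dict Int Int) e =>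
        if e - s > 0 then inn.insert e (e - s) else inn) PySem.Dict.empty)
      = (le.filter (fun e => decide (e - s > 0))).foldl
          (fun (inn : PySem.Dict Int Int) e => inn.insert e (e - s)) PySem.Dict.empty := by
    intro s
    rw [List.foldl_filter]
    congr 1
    funext inn e
    simp
  have houter := pvDictItems
    (fun s => (le.filter (fun e => decide (e - s > 0))).foldl
      (fun (inn : PySem.Dict Int Int) e => inn.insert e (e - s)) PySem.Dict.empty)
    (PySem.Dict.empty : PySem.Dict Int Int) ls
  calc ((ls.foldl (fun (d : PySem.Dict Int (PySem.Dict Int Int)) iStart =>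
        d.insert iStart (le.foldl (fun (inn : PySem.Dict Int Int) iEnd =>
          if iEnd - iStart > 0 then inn.insert iEnd (iEnd - iStart) else inn) PySem.Dict.empty))
        PySem.Dict.empty).items.foldl
      (fun (st : PvSt) si => si.2.items.foldl
        (fun st ei => if ei.2 < st.2 then (some (si.1, ei.1), ei.2) else st) st) init)
      = ((ls.foldl (fun (d : PySem.Dict Int (PySem.Dict Int Int)) iStart =>
          d.insert iStart ((le.filter (fun e => decide (e - iStart > 0))).foldl
            (fun (inn : PySem.Dict Int Int) e => inn.insert e (e - iStart)) PySem.Dict.empty))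
          PySem.Dict.empty).items.foldl
        (fun (st : PvSt) si => si.2.items.foldl
          (fun st ei => if ei.2 < st.2 then (some (si.1, ei.1), ei.2) else st) st) init) := by
        have hfun : (fun (d : PySem.Dict Int (PySem.Dict Int Int)) iStart =>
            d.insert iStart (le.foldl (fun (inn : PySem.Dict Int Int) iEnd =>
              if iEnd - iStart > 0 then inn.insert iEnd (iEnd - iStart) else inn) PySem.Dict.empty))
            = (fun (d : PySem.Dict Int (PySem.Dict Int Int)) iStart =>
            d.insert iStart ((le.filter (fun e => decide (e - iStart > 0))).foldl
              (fun (inn : PySem.Dict Int Int) e => inn.insert e (e - iStart)) PySem.Dict.empty)) := by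
          funext d iStart
          rw [hinner iStart]
        rw [hfun]
    _ = ((PySem.List.dedup ls).map (fun k => (k,
          (le.filter (fun e => decide (e - k > 0))).foldl
            (fun (inn : PySem.Dict Int Int) e => inn.insert e (e - k)) PySem.Dict.empty))).foldl
        (fun (st : PvSt) si => si.2.items.foldl
          (fun st ei => if ei.2 < st.2 then (some (si.1, ei.1), ei.2) else st) st) init := by
        rw [houter]
    _ = (PySem.List.dedup ls).foldl
          (pvStep (PySem.List.sorted le (fun x => x) false)) init := by
        rw [List.foldl_map]
        congr 1
        funext st s
        dsimp only
        rw [pvDictItems (fun e => e - s) (0 : Int) (le.filter (fun e => decide (e - s > 0)))]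
        rw [List.foldl_map]
        exact pvBridge le s st
    _ = ls.foldl (pvStep (PySem.List.sorted le (fun x => x) false)) init :=
        pvDedupFold _ ls init

-- the two ports agree on every input
lemma pvPorts_eq (ls le : List Int) : extract_inner_pair ls le = extract_inner_pair_alt ls le := by
  unfold extract_inner_pair extract_inner_pair_alt
  simp only []
  rw [pvScan_eq ls le (none, PySem.List.pyGetD le (-1) 0)]
  rfl

-- ===== VERDICT (by name: the statement is the Claim_ definition above) =====
theorem extract_inner_pair_spec : Claim_equal_extract_inner_pair := by
  intro ls le _ _
  unfold Spec_extract_inner_pair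
  exact pvPorts_eq ls le
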